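-- pv_equiv track=rewrite | github.com/yuxiua/open_chess_zero | lib/ucci.py | fliped_state
-- ===== SOURCE A (Python) =====
-- def fliped_state(state):
--     rows = state.split('/')
--
--     def swapcase(a):
--         if a.isalpha():
--             return a.lower() if a.isupper() else a.upper()
--         return a
--
--     def swapall(aa):
--         return "".join([swapcase(a) for a in aa])
--
--     return "/".join([swapall(reversed(row)) for row in reversed(rows)])
-- ===== SOURCE B (Python) =====
-- def fliped_state(state):
--     # '/' is its own reverse, so reversing rows and each row's chars is just
--     # reversing the whole string; swapcase handles the per-char case flip.
--     return state[::-1].swapcase()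
-- ===== Notes on version B (the rewrite author's own statement) =====
-- stated objective: simpler
-- what changed: Replaced the split-on-separator / reverse-rows / reverse-each-row / join pipeline with a hand-written per-char swapcase by a single whole-string reversal followed by str.swapcase, since the separator is a fixed point of both operations.
import Mathlib
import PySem

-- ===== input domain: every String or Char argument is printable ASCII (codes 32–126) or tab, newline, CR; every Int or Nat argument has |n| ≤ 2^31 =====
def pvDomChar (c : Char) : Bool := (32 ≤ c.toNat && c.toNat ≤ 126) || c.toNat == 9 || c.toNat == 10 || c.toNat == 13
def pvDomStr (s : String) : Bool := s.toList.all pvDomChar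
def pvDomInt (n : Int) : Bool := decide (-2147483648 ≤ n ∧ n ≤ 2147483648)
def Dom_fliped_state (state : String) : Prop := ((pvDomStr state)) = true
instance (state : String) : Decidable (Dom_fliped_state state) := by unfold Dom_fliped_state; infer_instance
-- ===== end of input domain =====

-- B replaces the split/reverse-rows/reverse-each-row/join pipeline by one whole-string
-- reversal plus a case swap ('/' is its own reverse): simpler, same linear cost.

-- ===== PORT A =====
-- A's inner swapcase on a one-character string, char-wise (exact on ASCII).
def swapcaseA (a : Char) : Char :=
  if PySem.Chars.isalpha a then
    (if PySem.Chars.isupper a then PySem.Chars.lowerChar a else PySem.Chars.upperChar a)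
  else a

-- A's swapall: "".join([swapcase(a) for a in aa]) — joining 1-char strings is a map.
def swapallA (aa : List Char) : List Char := aa.map swapcaseA

def fliped_state (state : String) : String :=
  let rows := PySem.Chars.splitOn state.toList ['/']
  String.ofList (PySem.Chars.join ['/'] ((rows.reverse).map (fun row => swapallA row.reverse)))

-- ===== PORT B =====
-- per-char str.swapcase (exact on the ASCII domain)
def pySwapChar (c : Char) : Char :=
  if PySem.Chars.islower c then PySem.Chars.upperChar c
  else if PySem.Chars.isupper c then PySem.Chars.lowerChar c
  else c

def fliped_state_alt (state : String) : String :=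
  String.ofList ((state.toList.reverse).map pySwapChar)

-- ===== PRECONDITION & SPEC =====
def Spec_fliped_state (state : String) (out : String) : Prop := out = fliped_state_alt state
instance (state : String) (out : String) : Decidable (Spec_fliped_state state out) := by unfold Spec_fliped_state; infer_instance

-- ===== CLAIM (what is proved, stated in full; the proofs are below) =====
def Claim_equal_fliped_state : Prop := ∀ (state : String), Dom_fliped_state state → Spec_fliped_state state (fliped_state state)

-- ===== LEMMAS AND PROOFS =====

-- the two per-char case swaps agree on every character
theorem swapcaseA_eq_pySwapChar (c : Char) : swapcaseA c = pySwapChar c := by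
  unfold swapcaseA pySwapChar PySem.Chars.isalpha
  by_cases hu : PySem.Chars.isupper c = true
  · have hl : PySem.Chars.islower c = false := by
      unfold PySem.Chars.isupper at hu
      unfold PySem.Chars.islower
      simp only [Bool.and_eq_true, decide_eq_true_eq] at hu
      simp only [Bool.and_eq_false_iff, decide_eq_false_iff_not, not_le]
      left
      exact lt_of_le_of_lt hu.2 (by decide)
    simp [hu, hl]
  · by_cases hl : PySem.Chars.islower c = true <;>
      simp [hu, hl]

-- structural splitter: (first piece, remaining pieces) of l split at c
def msplit (c : Char) : List Char → List Char × List (List Char)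
  | [] => ([], [])
  | a :: t =>
    let p := msplit c t
    if a = c then ([], p.1 :: p.2) else (a :: p.1, p.2)

theorem splitOn_go_eq (c : Char) (fuel : Nat) (l cur : List Char) (acc : List (List Char))
    (h : l.length ≤ fuel) :
    PySem.Chars.splitOn.go [c] fuel l cur acc
      = acc.reverse ++ ((cur.reverse ++ (msplit c l).1) :: (msplit c l).2) := by
  induction fuel generalizing l cur acc with
  | zero =>
    have : l = [] := List.eq_nil_of_length_eq_zero (Nat.le_zero.mp h)
    subst this
    simp [PySem.Chars.splitOn.go, msplit]
  | succ n ih =>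
    cases l with
    | nil => simp [PySem.Chars.splitOn.go, msplit]
    | cons a t =>
      by_cases hac : a = c
      · subst hac
        have hpre : List.isPrefixOf [a] (a :: t) = true := by
          simp [List.isPrefixOf]
        rw [PySem.Chars.splitOn.go]
        simp only [hpre, if_true, List.length_cons, List.length_nil,
          List.drop_succ_cons, List.drop_zero]
        rw [ih t [] (cur.reverse :: acc) (Nat.le_of_succ_le_succ (by simpa using h))]
        simp [msplit]
      · have hpre : List.isPrefixOf [c] (a :: t) = false := by
          simp [List.isPrefixOf, BEq.beq]
          intro hh
          exact hac hh.symm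
        rw [PySem.Chars.splitOn.go]
        simp only [hpre, Bool.false_eq_true, if_false]
        rw [ih t (a :: cur) acc (Nat.le_of_succ_le_succ h)]
        simp [msplit, hac]

theorem splitOn_eq_msplit (c : Char) (l : List Char) :
    PySem.Chars.splitOn l [c] = (msplit c l).1 :: (msplit c l).2 := by
  unfold PySem.Chars.splitOn
  rw [splitOn_go_eq c (l.length + 1) l [] [] (Nat.le_succ _)]
  simp

-- intercalate unfolds on two leading pieces
theorem intercalate_cons₂ (sep x y : List Char) (xs : List (List Char)) :
    List.intercalate sep (x :: y :: xs) = x ++ sep ++ List.intercalate sep (y :: xs) := by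
  simp [List.intercalate, List.intersperse]

-- intercalate over a snoc
theorem intercalate_snoc (sep : List Char) (xs : List (List Char)) (y : List Char) (hxs : xs ≠ []) :
    List.intercalate sep (xs ++ [y]) = List.intercalate sep xs ++ sep ++ y := by
  induction xs with
  | nil => exact absurd rfl hxs
  | cons x xs ih =>
    cases xs with
    | nil => simp [List.intercalate, List.append_assoc]
    | cons x' xs' =>
      simp only [List.cons_append] at ih ⊢
      rw [intercalate_cons₂, ih (by simp), intercalate_cons₂]
      simp [List.append_assoc]

theorem intercalate_snoc_append (sep : List Char) (xs : List (List Char)) (y z : List Char) :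
    List.intercalate sep (xs ++ [y ++ z]) = List.intercalate sep (xs ++ [y]) ++ z := by
  cases xs with
  | nil => simp [List.intercalate]
  | cons x xs' =>
    rw [intercalate_snoc sep (x :: xs') (y ++ z) (by simp),
        intercalate_snoc sep (x :: xs') y (by simp)]
    simp [List.append_assoc]

-- the heart: joining the reversed, char-reversed, case-swapped pieces of the split of l
-- is the case-swapped reversal of l (sc fixes the separator '/')
theorem join_msplit (sc : Char → Char) (hsc : sc '/' = '/') (l : List Char) :
    List.intercalate ['/']
        ((((msplit '/' l).1 :: (msplit '/' l).2).reverse).map (fun r => r.reverse.map sc))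
      = (l.reverse).map sc := by
  induction l with
  | nil => simp [msplit, List.intercalate]
  | cons a t ih =>
    by_cases hac : a = '/'
    · subst hac
      rw [show msplit '/' ('/' :: t) = ([], (msplit '/' t).1 :: (msplit '/' t).2) from by
        simp [msplit]]
      simp only [List.reverse_cons, List.map_append, List.map_cons, List.map_nil,
        List.reverse_nil] at ih ⊢
      rw [intercalate_snoc ['/'] _ [] (by simp), ih]
      simp [hsc]
    · rw [show msplit '/' (a :: t) = (a :: (msplit '/' t).1, (msplit '/' t).2) from by
        simp [msplit, hac]]
      simp only [List.reverse_cons, List.map_append, List.map_cons, List.map_nil,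
        List.map_reverse] at ih ⊢
      rw [intercalate_snoc_append, ih]

-- ===== VERDICT (by name: the statement is the Claim_ definition above) =====
theorem fliped_state_spec : Claim_equal_fliped_state := by
  intro state _
  unfold Spec_fliped_state fliped_state fliped_state_alt
  rw [splitOn_eq_msplit]
  unfold PySem.Chars.join
  have h := join_msplit swapcaseA (by decide) state.toList
  simp only [swapallA]
  rw [h]
  congr 1
  exact List.map_congr_left (fun c _ => swapcaseA_eq_pySwapChar c)
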